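-- pv_equiv track=rewrite | github.com/RyuSungyoung/BTM539 | programmers_coding_test_example_answer.py | solution
-- ===== SOURCE A (Python) =====
-- def solution(s):
--     current = ""
--     same = 0
--     diff = 0
--     temp = 0
--     for i in s:
--         if current=="":
--             current = i
--             same += 1
--             temp += 1
--         else:
--             if i==current:
--                 same+=1
--             else:
--                 diff+=1
--             if same==diff:
--                 current=""
--     return temp
-- ===== SOURCE B (Python) =====
-- def solution(s):
--     # A group of the split can only close after an even number of characters
--     # (anchor-matches must equal mismatches), so walk two characters per step,
--     # counting anchor occurrences per 2-char slice with str.count.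
--     ans = 0
--     n = len(s)
--     i = 0
--     while i < n:
--         ans += 1
--         c = s[i]
--         cnt = 0
--         j = i
--         while j < n:
--             cnt += s[j:j+2].count(c)
--             j += 2
--             if cnt * 2 == j - i:
--                 break
--         i = j
--     return ans
-- ===== Notes on version B (the rewrite author's own statement) =====
-- stated objective: alternative
-- what changed: Replaces A's flat per-character state machine (reset-flag 'current', never-reset same/diff counters) by a group-consuming scheme based on the invariant that a group can only close after an even number of characters: B strides two characters at a time, tallying anchor occurrences per 2-char slice with str.count and closing the group when twice the tally equals its length.
import Mathlib
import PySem

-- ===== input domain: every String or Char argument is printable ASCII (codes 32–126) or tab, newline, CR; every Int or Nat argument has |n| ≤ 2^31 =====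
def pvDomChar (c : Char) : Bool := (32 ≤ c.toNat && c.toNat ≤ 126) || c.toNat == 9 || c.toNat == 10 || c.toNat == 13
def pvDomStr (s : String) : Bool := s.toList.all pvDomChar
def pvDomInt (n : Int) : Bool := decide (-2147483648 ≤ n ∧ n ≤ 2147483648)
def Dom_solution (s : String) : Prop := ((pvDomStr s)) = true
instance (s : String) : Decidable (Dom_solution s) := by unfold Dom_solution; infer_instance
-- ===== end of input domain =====

-- B replaces A's per-character reset-flag state machine by a two-characters-per-step
-- group consumer (a group can only close after an even number of characters); same O(n) cost.

-- ===== PORT A =====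
-- A's loop body: state (current, same, diff, temp); current = "" is modelled as none.
def pvStepA (st : Option Char × Int × Int × Int) (i : Char) : Option Char × Int × Int × Int :=
  match st with
  | (none, same, diff, temp) => (some i, same + 1, diff, temp + 1)
  | (some c, same, diff, temp) =>
      let sd := if i == c then (same + 1, diff) else (same, diff + 1)
      if sd.1 == sd.2 then (none, sd.1, sd.2, temp) else (some c, sd.1, sd.2, temp)

def solution (s : String) : Int :=
  (s.toList.foldl pvStepA (none, 0, 0, 0)).2.2.2

-- ===== PORT B =====
-- Inner while loop: the remaining suffix s[j:] is carried as a list, m = j - i;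
-- each iteration takes the 2-char slice s[j:j+2], adds its count of c, steps by 2.
def pvInner2 (c : Char) (cnt m : Int) : List Char → List Char
  | [] => []
  | x :: rest =>
      let pair := x :: rest.take 1                -- s[j:j+2]
      let cnt' := cnt + (pair.count c : Int)       -- cnt += s[j:j+2].count(c)
      let m' := m + 2                              -- j += 2  (m = j - i)
      if cnt' * 2 == m' then rest.drop 1           -- break: remainder s[j:]
      else pvInner2 c cnt' m' (rest.drop 1)
termination_by l => l.length
decreasing_by simp

theorem pvInner2_length (c : Char) : ∀ (n : ℕ) (cnt m : Int) (l : List Char), l.length = n →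
    (pvInner2 c cnt m l).length ≤ l.length - 1 := by
  intro n
  induction n using Nat.strong_induction_on with
  | _ n ih =>
    intro cnt m l hl
    match l with
    | [] => simp [pvInner2]
    | x :: rest =>
        rw [pvInner2.eq_def]
        simp only []
        split
        · simp
        · have h1 : (rest.drop 1).length < n := by simp at hl ⊢; omega
          have := ih _ h1 (cnt + ((x :: rest.take 1).count c : Int)) (m + 2) (rest.drop 1) rfl
          simp only [List.length_drop] at this
          simp only [List.length_cons]
          omega

-- Outer while loop: one answer increment per group; the group starts at the anchor,
-- which is included in the first 2-char slice (j starts at i).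
def pvOuter2 : List Char → Int
  | [] => 0
  | x :: xs => 1 + pvOuter2 (pvInner2 x 0 0 (x :: xs))
termination_by l => l.length
decreasing_by
  have := pvInner2_length x (x :: xs).length 0 0 (x :: xs) rfl
  simp at this ⊢; omega

def solution_alt (s : String) : Int := pvOuter2 s.toList

-- ===== PRECONDITION & SPEC =====
def Spec_solution (s : String) (out : Int) : Prop := out = solution_alt s
instance (s : String) (out : Int) : Decidable (Spec_solution s out) := by unfold Spec_solution; infer_instance

-- ===== CLAIM (what is proved, stated in full; the proofs are below) =====
def Claim_equal_solution : Prop := ∀ (s : String), Dom_solution s → Spec_solution s (solution s)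

-- ===== LEMMAS AND PROOFS =====

-- Unfolding equations for the well-founded definitions (used by the proofs below).
theorem pvOuter2_nil : pvOuter2 [] = 0 := by rw [pvOuter2.eq_def]

theorem pvOuter2_cons (x : Char) (xs : List Char) :
    pvOuter2 (x :: xs) = 1 + pvOuter2 (pvInner2 x 0 0 (x :: xs)) := by
  rw [pvOuter2.eq_def]

theorem pvInner2_nil (c : Char) (cnt m : Int) : pvInner2 c cnt m [] = [] := by
  rw [pvInner2.eq_def]

theorem pvInner2_cons (c : Char) (cnt m : Int) (x : Char) (rest : List Char) :
    pvInner2 c cnt m (x :: rest) =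
      (if ((cnt + ((x :: rest.take 1).count c : Int)) * 2 == m + 2) = true then rest.drop 1
       else pvInner2 c (cnt + ((x :: rest.take 1).count c : Int)) (m + 2) (rest.drop 1)) := by
  rw [pvInner2.eq_def]

-- Invariant: when A's current is "", same = diff (part 1); mid-group, A's counters are
-- (x + cnt, x + 2k - cnt) where cnt counts the anchor char in the consumed even-length
-- group prefix of length 2k (part 2); A can never reset after an odd number of group
-- characters, which lets B check only at even offsets.
theorem pv_main : ∀ (n : ℕ) (l : List Char), l.length = n →
    ((∀ (x temp : Int), (List.foldl pvStepA (none, x, x, temp) l).2.2.2 = temp + pvOuter2 l) ∧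
     (∀ (c : Char) (cnt k x temp : Int),
        (List.foldl pvStepA (some c, x + cnt, x + 2*k - cnt, temp) l).2.2.2
          = temp + pvOuter2 (pvInner2 c cnt (2*k) l))) := by
  intro n
  induction n using Nat.strong_induction_on with
  | _ n ih =>
    intro l hl
    constructor
    · intro x temp
      match l with
      | [] => rw [pvOuter2_nil]; simp
      | [c] =>
          rw [pvOuter2_cons, pvInner2_cons]
          simp only [List.foldl, pvStepA]
          split <;> simp [pvOuter2_nil, pvInner2_nil]
      | c :: y :: ys =>
          have hys : ys.length < n := by simp at hl; omega
          rw [pvOuter2_cons, pvInner2_cons]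
          by_cases hyc : (y == c) = true
          · -- second char matches the anchor: cnt' = 2, no balance, keep consuming
            have hA : (x + 1 + 1 == x) = false := by
              simp only [beq_eq_false_iff_ne, ne_eq]; omega
            simp only [List.foldl, pvStepA, hyc, if_true, hA, Bool.false_eq_true, if_false,
              List.take, List.count_cons, List.count_nil, List.drop]
            simp only [beq_self_eq_true, if_true]
            have hB : ((0 + (2:Int)) * 2 == 0 + 2) = false := by decide
            rw [if_neg (by decide)]
            have := ((ih ys.length hys ys rfl).2) c 2 1 x (temp + 1)
            push_cast at this ⊢
            ring_nf at this ⊢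
            linarith [this]
          · -- second char differs: same = diff = x+1, A resets, B closes the 2-char group
            have hA : (x + 1 == x + 1) = true := by simp
            simp only [List.foldl, pvStepA, hyc, Bool.false_eq_true, if_false, hA, if_true,
              List.take, List.count_cons, List.count_nil, List.drop]
            simp only [beq_self_eq_true, if_true]
            rw [if_pos (by decide)]
            have := ((ih ys.length hys ys rfl).1) (x + 1) (temp + 1)
            push_cast at this ⊢
            ring_nf at this ⊢
            linarith [this]
    · intro c cnt k x temp
      match l with
      | [] =>
          rw [pvInner2_nil]
          simp [List.foldl, pvOuter2_nil]
      | [y] =>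
          -- one char left: A cannot balance (odd step); B consumes it and stops either way
          rw [pvInner2_cons]
          by_cases hyc : (y == c) = true
          · have hA : (x + cnt + 1 == x + 2*k - cnt) = false := by
              simp only [beq_eq_false_iff_ne, ne_eq]; omega
            simp only [List.foldl, pvStepA, hyc, if_true, hA, Bool.false_eq_true, if_false]
            split <;> simp [pvOuter2_nil, pvInner2_nil]
          · have hA : (x + cnt == x + 2*k - cnt + 1) = false := by
              simp only [beq_eq_false_iff_ne, ne_eq]; omega
            simp only [List.foldl, pvStepA, hyc, Bool.false_eq_true, if_false, hA]
            split <;> simp [pvOuter2_nil, pvInner2_nil]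
      | y :: z :: ys =>
          have hys : ys.length < n := by simp at hl; omega
          rw [pvInner2_cons]
          simp only [List.take, List.count_cons, List.count_nil, List.drop]
          -- cnt' = cnt + [y==c] + [z==c]; A takes two steps, never balancing mid-pair
          by_cases hyc : (y == c) = true <;> by_cases hzc : (z == c) = true
          all_goals simp only [hyc, hzc, Bool.false_eq_true, if_false, if_true]
          -- four cases; in each, decide whether the pair balances the group
          · -- y==c, z==c : cnt' = cnt+2, balance iff 2(cnt+2) = 2k+2 iff cnt+1 = k
            have hA1 : (x + cnt + 1 == x + 2*k - cnt) = false := by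
              simp only [beq_eq_false_iff_ne, ne_eq]; omega
            by_cases hb : cnt + 1 = k
            · have hA2 : (x + cnt + 1 + 1 == x + 2*k - cnt) = true := by
                simp only [beq_iff_eq]; omega
              have hB : ((cnt + (0 + 1 + 1 : ℕ)) * 2 == 2*k + 2) = true := by
                simp only [beq_iff_eq]; push_cast; omega
              simp only [List.foldl, pvStepA, hyc, hzc, if_true, hA1, Bool.false_eq_true,
                if_false, hA2, hB]
              have := ((ih ys.length hys ys rfl).1) (x + cnt + 1 + 1) temp
              rw [show x + 2*k - cnt = x + cnt + 1 + 1 from by omega]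
              exact this
            · have hA2 : (x + cnt + 1 + 1 == x + 2*k - cnt) = false := by
                simp only [beq_eq_false_iff_ne, ne_eq]; omega
              have hB : ((cnt + (0 + 1 + 1 : ℕ)) * 2 == 2*k + 2) = false := by
                simp only [beq_eq_false_iff_ne, ne_eq]; push_cast; omega
              simp only [List.foldl, pvStepA, hyc, hzc, if_true, hA1, Bool.false_eq_true,
                if_false, hA2, hB]
              have := ((ih ys.length hys ys rfl).2) c (cnt + 2) (k + 1) x temp
              push_cast at this ⊢
              ring_nf at this ⊢
              linarith [this]
          · -- y==c, z≠c : cnt' = cnt+1, balance iff 2(cnt+1) = 2k+2 iff cnt = k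
            have hA1 : (x + cnt + 1 == x + 2*k - cnt) = false := by
              simp only [beq_eq_false_iff_ne, ne_eq]; omega
            by_cases hb : cnt = k
            · have hA2 : (x + cnt + 1 == x + 2*k - cnt + 1) = true := by
                simp only [beq_iff_eq]; omega
              have hB : ((cnt + (0 + 1 : ℕ)) * 2 == 2*k + 2) = true := by
                simp only [beq_iff_eq]; push_cast; omega
              simp only [List.foldl, pvStepA, hyc, hzc, if_true, hA1, Bool.false_eq_true,
                if_false, hA2, hB]
              have := ((ih ys.length hys ys rfl).1) (x + cnt + 1) temp
              rw [show x + 2*k - cnt + 1 = x + cnt + 1 from by omega]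
              exact this
            · have hA2 : (x + cnt + 1 == x + 2*k - cnt + 1) = false := by
                simp only [beq_eq_false_iff_ne, ne_eq]; omega
              have hB : ((cnt + (0 + 1 : ℕ)) * 2 == 2*k + 2) = false := by
                simp only [beq_eq_false_iff_ne, ne_eq]; push_cast; omega
              simp only [List.foldl, pvStepA, hyc, hzc, if_true, hA1, Bool.false_eq_true,
                if_false, hA2, hB]
              have := ((ih ys.length hys ys rfl).2) c (cnt + 1) (k + 1) x temp
              push_cast at this ⊢
              ring_nf at this ⊢
              linarith [this]
          · -- y≠c, z==c : cnt' = cnt+1, balance iff cnt = k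
            have hA1 : (x + cnt == x + 2*k - cnt + 1) = false := by
              simp only [beq_eq_false_iff_ne, ne_eq]; omega
            by_cases hb : cnt = k
            · have hA2 : (x + cnt + 1 == x + 2*k - cnt + 1) = true := by
                simp only [beq_iff_eq]; omega
              have hB : ((cnt + (0 + 1 : ℕ)) * 2 == 2*k + 2) = true := by
                simp only [beq_iff_eq]; push_cast; omega
              simp only [List.foldl, pvStepA, hyc, hzc, if_true, hA1, Bool.false_eq_true,
                if_false, hA2, hB]
              have := ((ih ys.length hys ys rfl).1) (x + cnt + 1) temp
              rw [show x + 2*k - cnt + 1 = x + cnt + 1 from by omega]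
              exact this
            · have hA2 : (x + cnt + 1 == x + 2*k - cnt + 1) = false := by
                simp only [beq_eq_false_iff_ne, ne_eq]; omega
              have hB : ((cnt + (0 + 1 : ℕ)) * 2 == 2*k + 2) = false := by
                simp only [beq_eq_false_iff_ne, ne_eq]; push_cast; omega
              simp only [List.foldl, pvStepA, hyc, hzc, if_true, hA1, Bool.false_eq_true,
                if_false, hA2, hB]
              have := ((ih ys.length hys ys rfl).2) c (cnt + 1) (k + 1) x temp
              push_cast at this ⊢
              ring_nf at this ⊢
              linarith [this]
          · -- y≠c, z≠c : cnt' = cnt, balance iff 2cnt = 2k+2 iff cnt = k+1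
            have hA1 : (x + cnt == x + 2*k - cnt + 1) = false := by
              simp only [beq_eq_false_iff_ne, ne_eq]; omega
            by_cases hb : cnt = k + 1
            · have hA2 : (x + cnt == x + 2*k - cnt + 1 + 1) = true := by
                simp only [beq_iff_eq]; omega
              have hB : ((cnt + (0 : ℕ)) * 2 == 2*k + 2) = true := by
                simp only [beq_iff_eq]; push_cast; omega
              simp only [List.foldl, pvStepA, hyc, hzc, Bool.false_eq_true, if_false, hA1,
                hA2, if_true, hB]
              have := ((ih ys.length hys ys rfl).1) (x + cnt) temp
              rw [show x + 2*k - cnt + 1 + 1 = x + cnt from by omega]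
              exact this
            · have hA2 : (x + cnt == x + 2*k - cnt + 1 + 1) = false := by
                simp only [beq_eq_false_iff_ne, ne_eq]; omega
              have hB : ((cnt + (0 : ℕ)) * 2 == 2*k + 2) = false := by
                simp only [beq_eq_false_iff_ne, ne_eq]; push_cast; omega
              simp only [List.foldl, pvStepA, hyc, hzc, Bool.false_eq_true, if_false, hA1,
                hA2, hB]
              have := ((ih ys.length hys ys rfl).2) c cnt (k + 1) x temp
              push_cast at this ⊢
              ring_nf at this ⊢
              linarith [this]

-- ===== VERDICT (by name: the statement is the Claim_ definition above) =====
theorem solution_spec : Claim_equal_solution := by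
  intro s _
  unfold Spec_solution solution solution_alt
  simpa using ((pv_main s.toList.length s.toList rfl).1) 0 0
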